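-- pv_equiv track=rewrite | github.com/DLukacevic-IDM/SAEDashboard | indicator-manager/workflow/tools.py | _sanitize_python_output
-- ===== SOURCE A (Python) =====
-- METADATA_PREFIXES = ("META:", "FILE_SAVED:", "SCHEMA:", "SHAPE:", "COLUMNS:", "DTYPE:", "ERROR:", "INFO:")
--
-- def _sanitize_python_output(out: str) -> str:
--     lines = out.splitlines()
--     kept = []
--     for line in lines:
--         if any(line.startswith(p) for p in METADATA_PREFIXES):
--             kept.append(line)
--         elif line.strip() == "":
--             continue
--         else:
--             kept.append("META:[output hidden — save to file for user display]")
--             break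
--     return "\n".join(kept)
-- ===== SOURCE B (Python) =====
-- METADATA_PREFIXES = ("META:", "FILE_SAVED:", "SCHEMA:", "SHAPE:", "COLUMNS:", "DTYPE:", "ERROR:", "INFO:")
--
-- def _sanitize_python_output(out: str) -> str:
--     # Backward single pass, building the result back-to-front: a content line
--     # RESETS the accumulator to just the placeholder (everything after it is
--     # irrelevant), a metadata line is prepended, a blank line is skipped.
--     # This removes the break entirely: by the time we reach the front, the
--     # accumulator holds exactly the metadata head plus the placeholder iff a
--     # content line exists.
--     acc = []
--     for line in reversed(out.splitlines()):
--         if line.startswith(METADATA_PREFIXES):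
--             acc = [line] + acc
--         elif line.strip():
--             acc = ["META:[output hidden — save to file for user display]"]
--     return "\n".join(acc)
-- ===== Notes on version B (the rewrite author's own statement) =====
-- stated objective: alternative
-- what changed: Replaces A's forward loop with break by a single backward pass that builds the output back-to-front: a content line resets the accumulator to the placeholder (discarding everything later), a metadata line is prepended, blanks are skipped; no break or cutoff search is needed.
import Mathlib
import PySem

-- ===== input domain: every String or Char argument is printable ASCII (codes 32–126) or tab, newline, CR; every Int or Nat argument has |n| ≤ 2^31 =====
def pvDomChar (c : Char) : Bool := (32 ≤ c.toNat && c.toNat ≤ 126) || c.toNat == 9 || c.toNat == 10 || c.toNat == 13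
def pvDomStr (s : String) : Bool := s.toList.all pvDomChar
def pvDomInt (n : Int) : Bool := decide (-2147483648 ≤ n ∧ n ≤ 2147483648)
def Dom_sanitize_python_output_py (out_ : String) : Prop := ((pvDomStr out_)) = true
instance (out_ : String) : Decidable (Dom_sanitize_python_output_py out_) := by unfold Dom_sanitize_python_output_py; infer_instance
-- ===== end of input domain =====

-- B replaces A's forward loop with break by a single backward pass whose accumulator
-- is reset by a content line (output built back-to-front); alternative decomposition, same cost.

def METADATA_PREFIXES : List String :=
  ["META:", "FILE_SAVED:", "SCHEMA:", "SHAPE:", "COLUMNS:", "DTYPE:", "ERROR:", "INFO:"]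

def pvPlaceholder : String := "META:[output hidden — save to file for user display]"

-- ===== PORT A =====
-- A's for-loop with break, as structural recursion over the lines.
def pvLoopA : List String → List String
  | [] => []
  | line :: rest =>
    if METADATA_PREFIXES.any (fun p => PySem.Str.startswith line p) then
      line :: pvLoopA rest
    else if PySem.Str.strip line == "" then
      pvLoopA rest
    else
      [pvPlaceholder]

def sanitize_python_output_py (out_ : String) : String :=
  PySem.Str.join "\n" (pvLoopA (PySem.Str.splitlines out_))

-- ===== PORT B =====
-- B's loop body: prepend a metadata line, reset on a content line, skip blanks.
def pvStepB (acc : List String) (line : String) : List String :=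
  if METADATA_PREFIXES.any (fun p => PySem.Str.startswith line p) then
    line :: acc
  else if PySem.Str.strip line != "" then
    [pvPlaceholder]
  else
    acc

def sanitize_python_output_py_alt (out_ : String) : String :=
  PySem.Str.join "\n" (((PySem.Str.splitlines out_).reverse).foldl pvStepB [])

-- ===== PRECONDITION & SPEC =====
def Spec_sanitize_python_output_py (out_ : String) (out : String) : Prop := out = sanitize_python_output_py_alt out_
instance (out_ : String) (out : String) : Decidable (Spec_sanitize_python_output_py out_ out) := by unfold Spec_sanitize_python_output_py; infer_instance

-- ===== CLAIM (what is proved, stated in full; the proofs are below) =====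
def Claim_equal_sanitize_python_output_py : Prop := ∀ (out_ : String), Dom_sanitize_python_output_py out_ → Spec_sanitize_python_output_py out_ (sanitize_python_output_py out_)

-- ===== LEMMAS AND PROOFS =====

-- Folding B's step from the right is exactly A's break-loop: a content line makes
-- the step ignore its accumulator, which models the break.
theorem pvLoopA_cons (l : String) (rest : List String) :
    pvLoopA (l :: rest) =
      (if METADATA_PREFIXES.any (fun p => PySem.Str.startswith l p) then l :: pvLoopA rest
       else if PySem.Str.strip l == "" then pvLoopA rest
       else [pvPlaceholder]) := rfl

theorem pvLoopA_eq_foldr (ls : List String) :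
    pvLoopA ls = ls.foldr (fun line acc => pvStepB acc line) [] := by
  induction ls with
  | nil => rfl
  | cons l rest ih =>
    show pvLoopA (l :: rest) = pvStepB (rest.foldr (fun line acc => pvStepB acc line) []) l
    rw [← ih, pvLoopA_cons]
    unfold pvStepB
    by_cases hm : (METADATA_PREFIXES.any fun p => PySem.Str.startswith l p) = true
    · rw [if_pos hm, if_pos hm]
    · rw [if_neg hm, if_neg hm]
      by_cases hb : (PySem.Str.strip l == "") = true
      · rw [if_pos hb, if_neg (by simp [bne, hb])]
      · rw [if_neg hb, if_pos (by simp only [bne]; simp only [Bool.not_eq_true] at hb; simp [hb])]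

-- ===== VERDICT (by name: the statement is the Claim_ definition above) =====
theorem sanitize_python_output_py_spec : Claim_equal_sanitize_python_output_py := by
  intro out_ _
  unfold Spec_sanitize_python_output_py sanitize_python_output_py sanitize_python_output_py_alt
  rw [List.foldl_reverse, pvLoopA_eq_foldr]
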